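-- pv_equiv track=rewrite | github.com/SreejaKondaparthi/major_project_sreeja | tools/uiv_basic_to_yolo.py | canonical_label
-- ===== SOURCE A (Python) =====
-- def canonical_label(raw: str) -> str:
--     if not raw: return ""
--     s = raw.lower()
--     if any(k in s for k in ["button","btn","fab","submit","ok","next","save","apply","post","confirm","cancel"]): return "button"
--     if any(k in s for k in ["input","field","textbox","search","email","password","username","query","edit","box"]): return "field"
--     if any(k in s for k in ["title","header","heading","h1","h2","toolbar"]): return "heading"
--     if any(k in s for k in ["image","img","icon","logo","avatar","thumbnail","thumb","imageview","iv","picture","pic"]): return "image"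
--     if any(k in s for k in ["label","subtitle","caption","hint","tag","chip","badge"]): return "label"
--     if any(k in s for k in ["link","href","read_more","learn_more"]): return "link"
--     if any(k in s for k in ["text","content","message","desc","value","body","paragraph"]): return "text"
--     return ""
-- ===== SOURCE B (Python) =====
-- CATS = ["button", "field", "heading", "image", "label", "link", "text"]
-- KW = {
--     "button": 0, "btn": 0, "fab": 0, "submit": 0, "ok": 0, "next": 0,
--     "save": 0, "apply": 0, "post": 0, "confirm": 0, "cancel": 0,
--     "input": 1, "field": 1, "textbox": 1, "search": 1, "email": 1,
--     "password": 1, "username": 1, "query": 1, "edit": 1, "box": 1,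
--     "title": 2, "header": 2, "heading": 2, "h1": 2, "h2": 2, "toolbar": 2,
--     "image": 3, "img": 3, "icon": 3, "logo": 3, "avatar": 3, "thumbnail": 3,
--     "thumb": 3, "imageview": 3, "iv": 3, "picture": 3, "pic": 3,
--     "label": 4, "subtitle": 4, "caption": 4, "hint": 4, "tag": 4,
--     "chip": 4, "badge": 4,
--     "link": 5, "href": 5, "read_more": 5, "learn_more": 5,
--     "text": 6, "content": 6, "message": 6, "desc": 6, "value": 6,
--     "body": 6, "paragraph": 6,
-- }
--
-- def canonical_label(raw: str) -> str:
--     if not raw: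
--         return ""
--     s = raw.lower()
--     best = len(CATS)
--     for i in range(len(s)):
--         for kw, rank in KW.items():
--             if s.startswith(kw, i):
--                 best = min(best, rank)
--     return CATS[best] if best < len(CATS) else ""
-- ===== Notes on version B (the rewrite author's own statement) =====
-- stated objective: alternative
-- what changed: B scans the lowered string position by position, testing every keyword as a prefix at each offset and keeping the minimum category rank seen, then maps that rank to its category name; A instead runs seven early-exit any(substring) checks, one per category.
import Mathlib
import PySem

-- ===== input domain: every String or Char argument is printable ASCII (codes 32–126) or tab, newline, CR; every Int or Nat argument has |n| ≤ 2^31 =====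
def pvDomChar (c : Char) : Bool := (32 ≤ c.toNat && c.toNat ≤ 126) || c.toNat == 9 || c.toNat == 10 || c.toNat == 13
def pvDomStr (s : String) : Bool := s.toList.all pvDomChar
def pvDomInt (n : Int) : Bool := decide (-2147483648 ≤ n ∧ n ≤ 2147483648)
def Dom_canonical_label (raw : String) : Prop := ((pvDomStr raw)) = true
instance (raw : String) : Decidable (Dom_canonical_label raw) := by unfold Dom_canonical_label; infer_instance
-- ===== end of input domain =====

-- B classifies by a position-major scan (prefix test per offset, min-rank accumulator)
-- instead of A's seven early-exit any(substring) checks (objective: alternative).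


-- ===== PORT A =====
def canonical_label (raw : String) : String :=
  if raw = "" then ""
  else
    let s := PySem.Str.lower raw
    if (["button","btn","fab","submit","ok","next","save","apply","post","confirm","cancel"] : List String).any (fun k => PySem.Str.isIn k s) then "button"
    else if (["input","field","textbox","search","email","password","username","query","edit","box"] : List String).any (fun k => PySem.Str.isIn k s) then "field"
    else if (["title","header","heading","h1","h2","toolbar"] : List String).any (fun k => PySem.Str.isIn k s) then "heading"
    else if (["image","img","icon","logo","avatar","thumbnail","thumb","imageview","iv","picture","pic"] : List String).any (fun k => PySem.Str.isIn k s) then "image"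
    else if (["label","subtitle","caption","hint","tag","chip","badge"] : List String).any (fun k => PySem.Str.isIn k s) then "label"
    else if (["link","href","read_more","learn_more"] : List String).any (fun k => PySem.Str.isIn k s) then "link"
    else if (["text","content","message","desc","value","body","paragraph"] : List String).any (fun k => PySem.Str.isIn k s) then "text"
    else ""

-- ===== PORT B =====
-- B's module-level CATS list and KW dict (keyword -> category rank, insertion order)
def pvCats : List String := ["button", "field", "heading", "image", "label", "link", "text"]

def pvKw : List (String × Nat) :=
  [("button",0),("btn",0),("fab",0),("submit",0),("ok",0),("next",0),
   ("save",0),("apply",0),("post",0),("confirm",0),("cancel",0),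
   ("input",1),("field",1),("textbox",1),("search",1),("email",1),
   ("password",1),("username",1),("query",1),("edit",1),("box",1),
   ("title",2),("header",2),("heading",2),("h1",2),("h2",2),("toolbar",2),
   ("image",3),("img",3),("icon",3),("logo",3),("avatar",3),("thumbnail",3),
   ("thumb",3),("imageview",3),("iv",3),("picture",3),("pic",3),
   ("label",4),("subtitle",4),("caption",4),("hint",4),("tag",4),
   ("chip",4),("badge",4),
   ("link",5),("href",5),("read_more",5),("learn_more",5),
   ("text",6),("content",6),("message",6),("desc",6),("value",6),
   ("body",6),("paragraph",6)]

-- s.startswith(kw, i) with 0 ≤ i is ported exactly as a prefix test on s.toList.drop i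
def canonical_label_alt (raw : String) : String :=
  if raw = "" then ""
  else
    let s := (PySem.Str.lower raw).toList
    let best := (List.range s.length).foldl
      (fun best i => pvKw.foldl
        (fun best p =>
          if PySem.Chars.startswith (s.drop i) p.1.toList then min best p.2 else best) best)
      pvCats.length
    if best < pvCats.length then pvCats.getD best "" else ""

-- ===== PRECONDITION & SPEC =====
def Spec_canonical_label (raw : String) (out : String) : Prop := out = canonical_label_alt raw
instance (raw : String) (out : String) : Decidable (Spec_canonical_label raw out) := by unfold Spec_canonical_label; infer_instance

-- ===== CLAIM =====
def Claim_equal_canonical_label : Prop := ∀ (raw : String), Dom_canonical_label raw → Spec_canonical_label raw (canonical_label raw)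

-- ===== LEMMAS AND PROOFS =====

-- group g's keyword list (A's seven literal lists)
def pvGroup : Nat → List String
  | 0 => ["button","btn","fab","submit","ok","next","save","apply","post","confirm","cancel"]
  | 1 => ["input","field","textbox","search","email","password","username","query","edit","box"]
  | 2 => ["title","header","heading","h1","h2","toolbar"]
  | 3 => ["image","img","icon","logo","avatar","thumbnail","thumb","imageview","iv","picture","pic"]
  | 4 => ["label","subtitle","caption","hint","tag","chip","badge"]
  | 5 => ["link","href","read_more","learn_more"]
  | 6 => ["text","content","message","desc","value","body","paragraph"]
  | _ => []

def gAny (s : List Char) (g : Nat) : Bool := (pvGroup g).any (fun k => PySem.Chars.isIn k.toList s)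

-- the inner and outer folds of B
def pvInnerF (s : List Char) (i : Nat) (l : List (String × Nat)) (b : Nat) : Nat :=
  l.foldl (fun b p =>
    if PySem.Chars.startswith (s.drop i) p.1.toList then min b p.2 else b) b

def pvOuterF (s : List Char) (l : List Nat) (b : Nat) : Nat :=
  l.foldl (fun b i => pvInnerF s i pvKw b) b

def pvBest (s : List Char) : Nat := pvOuterF s (List.range s.length) 7

theorem pvKw_facts : ∀ p ∈ pvKw, p.1 ∈ pvGroup p.2 ∧ p.2 < 7 ∧ p.1.toList ≠ [] := by decide

theorem pvGroup_mem : ∀ g < 7, ∀ k ∈ pvGroup g, (k, g) ∈ pvKw := by decide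

theorem innerF_le_init (s : List Char) (i : Nat) (l : List (String × Nat)) (b : Nat) :
    pvInnerF s i l b ≤ b := by
  induction l generalizing b with
  | nil => exact le_refl b
  | cons p l ih =>
    unfold pvInnerF List.foldl
    split
    · exact le_trans (ih _) (Nat.min_le_left _ _)
    · exact ih b

theorem innerF_le (s : List Char) (i : Nat) (l : List (String × Nat)) (b : Nat)
    (p : String × Nat) (hp : p ∈ l)
    (hm : PySem.Chars.startswith (s.drop i) p.1.toList = true) : pvInnerF s i l b ≤ p.2 := by
  induction l generalizing b with
  | nil => cases hp
  | cons q l ih =>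
    unfold pvInnerF List.foldl
    rcases List.mem_cons.mp hp with h | h
    · subst h
      simp only [hm, if_true]
      exact le_trans (innerF_le_init s i l _) (Nat.min_le_right _ _)
    · split
      · exact ih _ h
      · exact ih _ h

theorem innerF_eq_or (s : List Char) (i : Nat) (l : List (String × Nat)) (b : Nat) :
    pvInnerF s i l b = b ∨ ∃ p ∈ l,
      PySem.Chars.startswith (s.drop i) p.1.toList = true ∧ pvInnerF s i l b = p.2 := by
  induction l generalizing b with
  | nil => left; rfl
  | cons p l ih =>
    unfold pvInnerF List.foldl
    by_cases h : PySem.Chars.startswith (s.drop i) p.1.toList = true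
    · simp only [h, if_true]
      rcases ih (min b p.2) with h1 | ⟨q, hq, hm, he⟩
      · rcases Nat.le_total b p.2 with h2 | h2
        · left
          show pvInnerF s i l (min b p.2) = b
          rw [h1, Nat.min_eq_left h2]
        · right
          refine ⟨p, List.mem_cons_self .., h, ?_⟩
          show pvInnerF s i l (min b p.2) = p.2
          rw [h1, Nat.min_eq_right h2]
      · right; exact ⟨q, List.mem_cons_of_mem _ hq, hm, he⟩
    · simp only [h, Bool.false_eq_true, if_false]
      rcases ih b with h1 | ⟨q, hq, hm, he⟩
      · left; exact h1
      · right; exact ⟨q, List.mem_cons_of_mem _ hq, hm, he⟩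

theorem outerF_le_init (s : List Char) (l : List Nat) (b : Nat) : pvOuterF s l b ≤ b := by
  induction l generalizing b with
  | nil => exact le_refl b
  | cons i l ih =>
    unfold pvOuterF List.foldl
    exact le_trans (ih _) (innerF_le_init s i pvKw b)

theorem outerF_le (s : List Char) (l : List Nat) (b : Nat) (i : Nat) (hi : i ∈ l)
    (p : String × Nat) (hp : p ∈ pvKw)
    (hm : PySem.Chars.startswith (s.drop i) p.1.toList = true) : pvOuterF s l b ≤ p.2 := by
  induction l generalizing b with
  | nil => cases hi
  | cons j l ih =>
    unfold pvOuterF List.foldl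
    rcases List.mem_cons.mp hi with h | h
    · subst h
      exact le_trans (outerF_le_init s l _) (innerF_le s i pvKw b p hp hm)
    · exact ih _ h

theorem outerF_eq_or (s : List Char) (l : List Nat) (b : Nat) :
    pvOuterF s l b = b ∨ ∃ i ∈ l, ∃ p ∈ pvKw,
      PySem.Chars.startswith (s.drop i) p.1.toList = true ∧ pvOuterF s l b = p.2 := by
  induction l generalizing b with
  | nil => left; rfl
  | cons j l ih =>
    unfold pvOuterF List.foldl
    rcases ih (pvInnerF s j pvKw b) with h1 | ⟨i, hi, p, hp, hm, he⟩
    · rcases innerF_eq_or s j pvKw b with h2 | ⟨p, hp, hm, he⟩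
      · left
        show pvOuterF s l (pvInnerF s j pvKw b) = b
        rw [h1, h2]
      · right
        refine ⟨j, List.mem_cons_self .., p, hp, hm, ?_⟩
        show pvOuterF s l (pvInnerF s j pvKw b) = p.2
        rw [h1, he]
    · right; exact ⟨i, List.mem_cons_of_mem _ hi, p, hp, hm, he⟩

-- matched group g (A-side condition) implies best ≤ g
theorem best_le_of_gAny (s : List Char) (g : Nat) (hg : g < 7) (h : gAny s g = true) :
    pvBest s ≤ g := by
  rcases List.any_eq_true.mp h with ⟨k, hk, hin⟩
  rcases (PySem.Chars.exists_prefix_drop_iff_isIn k.toList s).mpr hin with ⟨j, hj⟩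
  have hne : k.toList ≠ [] := (pvKw_facts _ (pvGroup_mem g hg k hk)).2.2
  have hlen : j < s.length := by
    have h1 := hj.length_le
    have h2 : 0 < k.toList.length := List.length_pos_iff.mpr hne
    simp only [List.length_drop] at h1
    omega
  exact outerF_le s _ 7 j (List.mem_range.mpr hlen) (k, g) (pvGroup_mem g hg k hk)
    ((PySem.Chars.startswith_iff _ _).mpr hj)

-- best = g < 7 implies group g matched
theorem gAny_of_best (s : List Char) (hlt : pvBest s < 7) : gAny s (pvBest s) = true := by
  rcases outerF_eq_or s (List.range s.length) 7 with h | ⟨i, _, p, hp, hm, he⟩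
  · exact absurd (show pvBest s = 7 from h) (by omega)
  · have hin : PySem.Chars.isIn p.1.toList s = true :=
      (PySem.Chars.exists_prefix_drop_iff_isIn p.1.toList s).mp
        ⟨i, (PySem.Chars.startswith_iff _ _).mp hm⟩
    rw [show pvBest s = p.2 from he]
    exact List.any_eq_true.mpr ⟨p.1, (pvKw_facts p hp).1, hin⟩

-- the core equivalence on the lowered string
theorem core (s : List Char) :
    (if gAny s 0 then "button"
     else if gAny s 1 then "field"
     else if gAny s 2 then "heading"
     else if gAny s 3 then "image"
     else if gAny s 4 then "label"
     else if gAny s 5 then "link"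
     else if gAny s 6 then "text"
     else "") =
    (if pvBest s < 7 then pvCats.getD (pvBest s) "" else "") := by
  by_cases h7 : pvBest s < 7
  · have hg := gAny_of_best s h7
    have hmin : ∀ g, g < pvBest s → gAny s g = false := by
      intro g hglt
      cases hb : gAny s g
      · rfl
      · exact absurd (best_le_of_gAny s g (by omega) hb) (by omega)
    rw [if_pos h7]
    interval_cases hb : pvBest s
    · simp [hg, pvCats]
    · simp [hmin 0 (by omega), hg, pvCats]
    · simp [hmin 0 (by omega), hmin 1 (by omega), hg, pvCats]
    · simp [hmin 0 (by omega), hmin 1 (by omega), hmin 2 (by omega), hg, pvCats]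
    · simp [hmin 0 (by omega), hmin 1 (by omega), hmin 2 (by omega), hmin 3 (by omega), hg,
        pvCats]
    · simp [hmin 0 (by omega), hmin 1 (by omega), hmin 2 (by omega), hmin 3 (by omega),
        hmin 4 (by omega), hg, pvCats]
    · simp [hmin 0 (by omega), hmin 1 (by omega), hmin 2 (by omega), hmin 3 (by omega),
        hmin 4 (by omega), hmin 5 (by omega), hg, pvCats]
  · have hnone : ∀ g, g < 7 → gAny s g = false := by
      intro g hglt
      cases hb : gAny s g
      · rfl
      · exact absurd (best_le_of_gAny s g hglt hb) (by omega)
    simp [h7, hnone 0 (by omega), hnone 1 (by omega), hnone 2 (by omega), hnone 3 (by omega),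
      hnone 4 (by omega), hnone 5 (by omega), hnone 6 (by omega)]

-- ===== VERDICT =====
theorem canonical_label_spec : Claim_equal_canonical_label := by
  intro raw _
  unfold Spec_canonical_label canonical_label canonical_label_alt
  by_cases h : raw = ""
  · simp [h]
  · rw [if_neg h, if_neg h]
    exact core (PySem.Str.lower raw).toList
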